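-- pv_equiv track=rewrite | github.com/RelyingEarth87/coding-challenges | IsShuffledWell.py | isShuffledWell
-- ===== SOURCE A (Python) =====
-- def isShuffledWell(nums: list[int]) -> bool:
--     """Determines whether or not an array of 10 numbers is shuffled enough (does not have more than 2 consecutive integers adjacent to one another)
--
--     Args:
--         nums (list[int]): randomly shuffled list of 10 integers
--
--     Returns:
--         bool: True if shuffled list does not have more than 2 consecutive integers adjacent to one another; False otherwise
--     """
--     counter = 0
--     i = 0
--     while i < len(nums) - 1:
--         if nums[i] + 1 == nums[i+1]:
--             counter += 1
--         elif nums[i] - 1 == nums[i+1]: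
--             counter -= 1
--         else:
--             counter = 0
--
--         if counter == 2 or counter == -2:
--             return False
--
--         i += 1
--
--     return True
-- ===== SOURCE B (Python) =====
-- def isShuffledWell(nums: list[int]) -> bool:
--     """Stateless sliding-window check: fail iff some three adjacent
--     elements form a run of consecutive integers (ascending or descending)."""
--     return not any((b - a == 1 and c - b == 1) or (b - a == -1 and c - b == -1)
--                    for a, b, c in zip(nums, nums[1:], nums[2:]))
-- ===== Notes on version B (the rewrite author's own statement) =====
-- stated objective: simpler
-- what changed: Replaces A's stateful running counter over the whole scan with a stateless sliding window that just checks each window of three adjacent elements for a consecutive ascending or descending run.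
-- intended difference: On lists that contain three adjacent consecutive integers but where no unit-step run ever moves 2 away from its reset point (e.g. [2,3,2,1]): A's counter, which is not reset on direction change, never reaches +-2 and A wrongly returns True; B returns False, the intended answer per the docstring ('does not have more than 2 consecutive integers adjacent'). — e.g. on isShuffledWell([2, 3, 2, 1]): A returns true, B returns false
import Mathlib
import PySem

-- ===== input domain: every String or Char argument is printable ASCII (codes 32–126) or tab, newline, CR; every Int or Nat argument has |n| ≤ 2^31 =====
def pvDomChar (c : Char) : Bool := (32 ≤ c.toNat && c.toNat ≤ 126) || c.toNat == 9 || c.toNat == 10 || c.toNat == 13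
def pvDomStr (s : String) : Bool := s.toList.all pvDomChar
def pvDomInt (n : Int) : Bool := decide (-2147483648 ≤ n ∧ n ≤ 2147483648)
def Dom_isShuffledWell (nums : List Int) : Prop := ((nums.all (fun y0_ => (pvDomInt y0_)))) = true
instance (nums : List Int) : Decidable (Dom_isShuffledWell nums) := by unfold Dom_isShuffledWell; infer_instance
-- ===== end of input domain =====

-- B replaces A's running counter with a stateless three-element sliding window (simpler);
-- on a small class of inputs (D_ below) A's counter misses a consecutive triple and B fixes that.

-- ===== PORT A =====
-- while-loop over index i with the running counter, literal transliteration
def pvGoA (nums : List Int) (counter : Int) (i : Nat) : Bool :=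
  if h : i < nums.length - 1 then
    let c : Int :=
      if nums[i]'(by omega) + 1 == nums[i+1]'(by omega) then counter + 1
      else if nums[i]'(by omega) - 1 == nums[i+1]'(by omega) then counter - 1
      else 0
    if c == 2 || c == -2 then false
    else pvGoA nums c (i + 1)
  else true
termination_by nums.length - 1 - i
decreasing_by omega

def isShuffledWell (nums : List Int) : Bool := pvGoA nums 0 0

-- ===== PORT B =====
def pvBad3 (a b c : Int) : Bool :=
  (b - a == 1 && c - b == 1) || (b - a == -1 && c - b == -1)

-- the generator over zip(nums, nums[1:], nums[2:]) as structural recursion over windows of three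
def pvHasTriple : List Int → Bool
  | a :: b :: c :: rest => pvBad3 a b c || pvHasTriple (b :: c :: rest)
  | _ => false

def isShuffledWell_alt (nums : List Int) : Bool := ! pvHasTriple nums

-- ===== PRECONDITION & SPEC =====
-- index-based helpers for the change region (conditions on the input only)
def pvG (nums : List Int) (k : Nat) : Int := nums.getD k 0
def pvUnit (nums : List Int) (k : Nat) : Bool :=
  pvG nums (k+1) - pvG nums k == 1 || pvG nums (k+1) - pvG nums k == -1
def pvTripleAtB (nums : List Int) (i : Nat) : Bool :=
  decide (i + 2 < nums.length) &&
    ((pvG nums (i+1) - pvG nums i == 1 && pvG nums (i+2) - pvG nums (i+1) == 1) ||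
     (pvG nums (i+1) - pvG nums i == -1 && pvG nums (i+2) - pvG nums (i+1) == -1))
def pvTripleAnyB (nums : List Int) : Bool :=
  (List.range nums.length).any (pvTripleAtB nums)
def pvBad0B (nums : List Int) (s : Nat) : Bool :=
  (List.range nums.length).any (fun j =>
    decide (s < j) &&
    (List.range' s (j - s)).all (fun k => pvUnit nums k) &&
    (pvG nums j - pvG nums s == 2 || pvG nums j - pvG nums s == -2))
def pvAFailB (nums : List Int) : Bool :=
  (List.range nums.length).any (fun s => (s == 0 || ! pvUnit nums (s-1)) && pvBad0B nums s)

-- On lists containing three adjacent consecutive integers but where no unit-step run ever moves 2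
-- away from its reset point (e.g. [2,3,2,1]), A's counter (not reset on direction change) never
-- reaches ±2 and A wrongly returns True; B returns False, the intended answer per the docstring.
def D_isShuffledWell (nums : List Int) : Prop :=
  pvTripleAnyB nums = true ∧ pvAFailB nums = false
instance (nums : List Int) : Decidable (D_isShuffledWell nums) := by
  unfold D_isShuffledWell; infer_instance

def Spec_isShuffledWell (nums : List Int) (out : Bool) : Prop :=
  ¬ D_isShuffledWell nums → out = isShuffledWell_alt nums
instance (nums : List Int) (out : Bool) : Decidable (Spec_isShuffledWell nums out) := by
  unfold Spec_isShuffledWell; infer_instance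

def pvDiffWitness_isShuffledWell : List Int := [2, 3, 2, 1]
def pvDiffWitnessOut_isShuffledWell : Bool × Bool := (true, false)

-- ===== CLAIM (what is proved, stated in full; the proofs are below) =====
def Claim_unchanged_isShuffledWell : Prop :=
  ∀ (nums : List Int), Dom_isShuffledWell nums → Spec_isShuffledWell nums (isShuffledWell nums)
def Claim_changed_isShuffledWell : Prop :=
  Dom_isShuffledWell (pvDiffWitness_isShuffledWell) ∧ D_isShuffledWell (pvDiffWitness_isShuffledWell) ∧
  isShuffledWell (pvDiffWitness_isShuffledWell) = pvDiffWitnessOut_isShuffledWell.1 ∧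
  isShuffledWell_alt (pvDiffWitness_isShuffledWell) = pvDiffWitnessOut_isShuffledWell.2 ∧
  pvDiffWitnessOut_isShuffledWell.1 ≠ pvDiffWitnessOut_isShuffledWell.2
def Claim_exact_isShuffledWell : Prop :=
  ∀ (nums : List Int), Dom_isShuffledWell nums → D_isShuffledWell nums →
    isShuffledWell nums ≠ isShuffledWell_alt nums

-- ===== LEMMAS AND PROOFS =====

-- Prop-level versions of the region helpers
def UnitP (l : List Int) (k : Nat) : Prop :=
  pvG l (k+1) - pvG l k = 1 ∨ pvG l (k+1) - pvG l k = -1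

def TripleP (l : List Int) (i : Nat) : Prop :=
  i + 2 < l.length ∧
    ((pvG l (i+1) - pvG l i = 1 ∧ pvG l (i+2) - pvG l (i+1) = 1) ∨
     (pvG l (i+1) - pvG l i = -1 ∧ pvG l (i+2) - pvG l (i+1) = -1))

-- "starting at position i with counter c, the loop would reach ±2 before any reset"
def AfterP (l : List Int) (i : Nat) (c : Int) : Prop :=
  ∃ j, i < j ∧ j < l.length ∧ (∀ k, i ≤ k → k < j → UnitP l k) ∧
    (pvG l j - pvG l i + c = 2 ∨ pvG l j - pvG l i + c = -2)

-- "some later reset point k+1 fails fresh"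
def FutP (l : List Int) (i : Nat) : Prop :=
  ∃ k, i ≤ k ∧ k + 1 < l.length ∧ ¬ UnitP l k ∧ AfterP l (k+1) 0

def AFailP (l : List Int) : Prop :=
  ∃ s, s < l.length ∧ (s = 0 ∨ ¬ UnitP l (s-1)) ∧ AfterP l s 0

theorem pvUnit_iff (l : List Int) (k : Nat) : pvUnit l k = true ↔ UnitP l k := by
  simp [pvUnit, UnitP]

theorem pvG_getElem (l : List Int) (k : Nat) (h : k < l.length) : pvG l k = l[k]'h := by
  simp [pvG, List.getD_eq_getElem?_getD, h]

-- loop invariant for A's while loop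
theorem goA_inv (l : List Int) (i : Nat) (c : Int) (hc1 : -1 ≤ c) (hc2 : c ≤ 1) :
    pvGoA l c i = false ↔ (AfterP l i c ∨ FutP l i) := by
  rw [pvGoA]
  by_cases h : i < l.length - 1
  · simp only [dif_pos h]
    have hi : i < l.length := by omega
    have hi1 : i + 1 < l.length := by omega
    have e0 : pvG l i = l[i]'hi := pvG_getElem l i hi
    have e1 : pvG l (i+1) = l[i+1]'hi1 := pvG_getElem l (i+1) hi1
    set d : Int := pvG l (i+1) - pvG l i with hd
    have split_after : ∀ c' : Int, AfterP l i c' ↔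
        (UnitP l i ∧ ((d + c' = 2 ∨ d + c' = -2) ∨ AfterP l (i+1) (c' + d))) := by
      intro c'
      constructor
      · rintro ⟨j, hij, hjl, hall, hval⟩
        have hui : UnitP l i := hall i le_rfl hij
        refine ⟨hui, ?_⟩
        rcases Nat.lt_or_ge (i+1) j with hj | hj
        · right
          exact ⟨j, hj, hjl, fun k hk1 hk2 => hall k (by omega) hk2, by
            rcases hval with hv | hv
            · left; omega
            · right; omega⟩
        · left
          have : j = i + 1 := by omega
          subst this
          rcases hval with hv | hv
          · left; omega
          · right; omega
      · rintro ⟨hui, hrest | ⟨j, hij, hjl, hall, hval⟩⟩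
        · exact ⟨i+1, by omega, by omega, fun k hk1 hk2 => by
            have : k = i := by omega
            subst this; exact hui, by
            rcases hrest with hv | hv
            · left; omega
            · right; omega⟩
        · refine ⟨j, by omega, hjl, ?_, ?_⟩
          · intro k hk1 hk2
            rcases Nat.lt_or_ge k (i+1) with hk | hk
            · have : k = i := by omega
              subst this; exact hui
            · exact hall k hk hk2
          · rcases hval with hv | hv
            · left; omega
            · right; omega
    have split_fut : FutP l i ↔ ((¬ UnitP l i ∧ AfterP l (i+1) 0) ∨ FutP l (i+1)) := by
      constructor
      · rintro ⟨k, hik, hkl, hnu, hb⟩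
        rcases Nat.lt_or_ge i k with hk | hk
        · right; exact ⟨k, by omega, hkl, hnu, hb⟩
        · left
          have : k = i := by omega
          subst this; exact ⟨hnu, hb⟩
      · rintro (⟨hnu, hb⟩ | ⟨k, hik, hkl, hnu, hb⟩)
        · exact ⟨i, le_rfl, by omega, hnu, hb⟩
        · exact ⟨k, by omega, hkl, hnu, hb⟩
    by_cases hu1 : d = 1
    · have hcond : (l[i]'hi + 1 == l[i+1]'hi1) = true := by
        rw [beq_iff_eq]; rw [← e0, ← e1]; omega
      simp only [hcond, if_true]
      have hunit : UnitP l i := Or.inl hu1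
      by_cases h2 : c + 1 = 2
      · have : ((c + 1 : Int) == 2 || (c + 1 : Int) == -2) = true := by
          simp; omega
        simp only [this, if_true]
        constructor
        · intro _
          left
          rw [split_after c]
          exact ⟨hunit, Or.inl (Or.inl (by omega))⟩
        · intro _; trivial
      · have hne : ((c + 1 : Int) == 2 || (c + 1 : Int) == -2) = false := by
          simp; omega
        simp only [hne, if_false, Bool.false_eq_true]
        rw [goA_inv l (i+1) (c+1) (by omega) (by omega)]
        rw [split_after c, split_fut, hu1]
        constructor
        · rintro (ha | hf)
          · exact Or.inl ⟨hunit, Or.inr ha⟩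
          · exact Or.inr (Or.inr hf)
        · rintro (⟨_, (hv | ha)⟩ | (⟨hnu, _⟩ | hf))
          · exfalso; omega
          · exact Or.inl ha
          · exact absurd hunit hnu
          · exact Or.inr hf
    · by_cases hu2 : d = -1
      · have hcond : (l[i]'hi + 1 == l[i+1]'hi1) = false := by
          rw [beq_eq_false_iff_ne]; rw [← e0, ← e1]; omega
        have hcond2 : (l[i]'hi - 1 == l[i+1]'hi1) = true := by
          rw [beq_iff_eq]; rw [← e0, ← e1]; omega
        simp only [hcond, if_false, hcond2, if_true, Bool.false_eq_true]
        have hunit : UnitP l i := Or.inr hu2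
        by_cases h2 : c - 1 = -2
        · have : ((c - 1 : Int) == 2 || (c - 1 : Int) == -2) = true := by
            simp; omega
          simp only [this, if_true]
          constructor
          · intro _
            left
            rw [split_after c]
            exact ⟨hunit, Or.inl (Or.inr (by omega))⟩
          · intro _; trivial
        · have hne : ((c - 1 : Int) == 2 || (c - 1 : Int) == -2) = false := by
            simp; omega
          simp only [hne, if_false, Bool.false_eq_true]
          rw [goA_inv l (i+1) (c-1) (by omega) (by omega)]
          rw [split_after c, split_fut, hu2]
          have harr : c + -1 = c - 1 := by ring
          rw [harr]
          constructor
          · rintro (ha | hf)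
            · exact Or.inl ⟨hunit, Or.inr ha⟩
            · exact Or.inr (Or.inr hf)
          · rintro (⟨_, (hv | ha)⟩ | (⟨hnu, _⟩ | hf))
            · exfalso; omega
            · exact Or.inl ha
            · exact absurd hunit hnu
            · exact Or.inr hf
      · -- non-unit step: counter reset to 0
        have hnu : ¬ UnitP l i := by
          intro hcon; rcases hcon with hv | hv
          · exact hu1 hv
          · exact hu2 hv
        have hcond : (l[i]'hi + 1 == l[i+1]'hi1) = false := by
          rw [beq_eq_false_iff_ne]; rw [← e0, ← e1]
          intro hcon; apply hu1; omega
        have hcond2 : (l[i]'hi - 1 == l[i+1]'hi1) = false := by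
          rw [beq_eq_false_iff_ne]; rw [← e0, ← e1]
          intro hcon; apply hu2; omega
        simp only [hcond, hcond2, if_false, Bool.false_eq_true]
        have : ((0 : Int) == 2 || (0 : Int) == -2) = false := by decide
        simp only [this, if_false, Bool.false_eq_true]
        rw [goA_inv l (i+1) 0 (by omega) (by omega)]
        rw [split_after c, split_fut]
        constructor
        · rintro (ha | hf)
          · right; left; exact ⟨hnu, ha⟩
          · right; right; exact hf
        · rintro (⟨hunit, _⟩ | (⟨_, ha⟩ | hf))
          · exact absurd hunit hnu
          · left; exact ha
          · right; exact hf
  · simp only [dif_neg h]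
    constructor
    · intro hcon; exact absurd hcon (by simp)
    · rintro (⟨j, hij, hjl, _, _⟩ | ⟨k, hik, hkl, _, _⟩) <;> omega
termination_by l.length - 1 - i
decreasing_by all_goals omega

theorem goA_false_iff (l : List Int) : pvGoA l 0 0 = false ↔ AFailP l := by
  rw [goA_inv l 0 0 (by omega) (by omega)]
  constructor
  · rintro (ha | ⟨k, _, hkl, hnu, hb⟩)
    · refine ⟨0, ?_, Or.inl rfl, ha⟩
      obtain ⟨j, _, hjl, _, _⟩ := ha
      omega
    · exact ⟨k+1, by omega, Or.inr (by simpa using hnu), hb⟩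
  · rintro ⟨s, hsl, hs0, hb⟩
    rcases Nat.eq_zero_or_pos s with hz | hp
    · subst hz; exact Or.inl hb
    · right
      refine ⟨s - 1, by omega, by omega, ?_, by
        have : s - 1 + 1 = s := by omega
        rw [this]; exact hb⟩
      rcases hs0 with h0 | hn
      · omega
      · exact hn

-- a unit-step path with net displacement ±2 contains two consecutive equal steps (a triple)
theorem path_triple (l : List Int) (s j : Nat) (hsj : s < j) (hjl : j < l.length)
    (hall : ∀ k, s ≤ k → k < j → UnitP l k)
    (hval : pvG l j - pvG l s = 2 ∨ pvG l j - pvG l s = -2) :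
    ∃ i, TripleP l i := by
  rcases Nat.lt_or_ge (s+1) j with h2 | h2
  · have hu0 : UnitP l s := hall s le_rfl (by omega)
    have hu1 : pvG l (s+2) - pvG l (s+1) = 1 ∨ pvG l (s+2) - pvG l (s+1) = -1 := by
      have hx := hall (s+1) (by omega) (by omega)
      unfold UnitP at hx
      rwa [show s+1+1 = s+2 by omega] at hx
    by_cases heq : pvG l (s+1) - pvG l s = pvG l (s+2) - pvG l (s+1)
    · refine ⟨s, ⟨by omega, ?_⟩⟩
      rcases hu0 with hv | hv
      · left; exact ⟨hv, by rw [← heq, hv]⟩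
      · right; exact ⟨hv, by rw [← heq, hv]⟩
    · have hcancel : pvG l (s+2) = pvG l s := by
        unfold UnitP at hu0
        rcases hu0 with h0 | h0 <;> rcases hu1 with h1 | h1
        · exact absurd (h0.trans h1.symm) heq
        · omega
        · omega
        · exact absurd (h0.trans h1.symm) heq
      have hs2 : s + 2 < j := by
        rcases Nat.lt_or_ge (s+2) j with hlt | hge
        · exact hlt
        · exfalso
          have hj2 : j = s + 2 := by omega
          rw [hj2, hcancel] at hval
          omega
      refine path_triple l (s+2) j (by omega) hjl
        (fun k hk1 hk2 => hall k (by omega) hk2) ?_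
      rw [hcancel]
      exact hval
  · exfalso
    have hj1 : j = s + 1 := by omega
    have hu := hall s le_rfl (by omega)
    unfold UnitP at hu
    rw [hj1] at hval
    rcases hu with hv | hv <;> omega
termination_by j - s
decreasing_by omega

-- structural triple scan = index-based triple scan
theorem hasTriple_iff (l : List Int) : pvHasTriple l = true ↔ ∃ i, TripleP l i := by
  match l with
  | [] => simp [pvHasTriple, TripleP]
  | [a] => simp [pvHasTriple, TripleP]
  | [a, b] =>
    simp only [pvHasTriple, Bool.false_eq_true, false_iff]
    rintro ⟨i, hi, _⟩
    simp [List.length] at hi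
  | a :: b :: c :: rest =>
    simp only [pvHasTriple, Bool.or_eq_true]
    rw [hasTriple_iff (b :: c :: rest)]
    have shift : ∀ k, pvG (a :: b :: c :: rest) (k+1) = pvG (b :: c :: rest) k := by
      intro k; simp [pvG]
    constructor
    · rintro (hb3 | ⟨i, hi, hcase⟩)
      · refine ⟨0, ⟨by simp only [List.length_cons]; omega, ?_⟩⟩
        have g0 : pvG (a :: b :: c :: rest) 0 = a := by simp [pvG]
        have g1 : pvG (a :: b :: c :: rest) 1 = b := by simp [pvG]
        have g2 : pvG (a :: b :: c :: rest) 2 = c := by simp [pvG]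
        rw [g0, g1, g2]
        simp only [pvBad3, Bool.or_eq_true, Bool.and_eq_true, beq_iff_eq] at hb3
        exact hb3
      · refine ⟨i + 1, ⟨by simp only [List.length_cons] at hi ⊢; omega, ?_⟩⟩
        rw [shift i, shift (i+1), shift (i+2)]
        exact hcase
    · rintro ⟨i, hi, hcase⟩
      match i with
      | 0 =>
        left
        have g0 : pvG (a :: b :: c :: rest) 0 = a := by simp [pvG]
        have g1 : pvG (a :: b :: c :: rest) 1 = b := by simp [pvG]
        have g2 : pvG (a :: b :: c :: rest) 2 = c := by simp [pvG]
        rw [g0, g1, g2] at hcase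
        simp only [pvBad3, Bool.or_eq_true, Bool.and_eq_true, beq_iff_eq]
        exact hcase
      | i + 1 =>
        right
        refine ⟨i, by simp only [List.length_cons] at hi ⊢; omega, ?_⟩
        rw [shift i, shift (i+1), shift (i+2)] at hcase
        exact hcase

theorem tripleAny_iff (l : List Int) : pvTripleAnyB l = true ↔ ∃ i, TripleP l i := by
  simp only [pvTripleAnyB, List.any_eq_true, List.mem_range, pvTripleAtB,
    Bool.and_eq_true, Bool.or_eq_true, beq_iff_eq, decide_eq_true_eq]
  constructor
  · rintro ⟨i, _, hlen, hcase⟩; exact ⟨i, hlen, hcase⟩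
  · rintro ⟨i, hlen, hcase⟩; exact ⟨i, by omega, hlen, hcase⟩

theorem bad0_iff (l : List Int) (s : Nat) : pvBad0B l s = true ↔ AfterP l s 0 := by
  simp only [pvBad0B, List.any_eq_true, List.mem_range, Bool.and_eq_true, decide_eq_true_eq,
    List.all_eq_true, List.mem_range'_1, Bool.or_eq_true, beq_iff_eq, AfterP]
  constructor
  · rintro ⟨j, hjl, ⟨hsj, hallu⟩, hval⟩
    refine ⟨j, hsj, hjl, ?_, by omega⟩
    intro k hk1 hk2
    rw [← pvUnit_iff]
    exact hallu k ⟨hk1, by omega⟩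
  · rintro ⟨j, hsj, hjl, hallu, hval⟩
    refine ⟨j, hjl, ⟨hsj, ?_⟩, by omega⟩
    intro k hk
    rw [pvUnit_iff]
    exact hallu k hk.1 (by omega)

theorem afail_iff (l : List Int) : pvAFailB l = true ↔ AFailP l := by
  simp only [pvAFailB, List.any_eq_true, List.mem_range, Bool.and_eq_true, Bool.or_eq_true,
    beq_iff_eq, Bool.not_eq_eq_eq_not, Bool.not_true, AFailP]
  constructor
  · rintro ⟨s, hsl, hs0, hb⟩
    refine ⟨s, hsl, ?_, (bad0_iff l s).mp hb⟩
    rcases hs0 with h0 | hn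
    · exact Or.inl h0
    · right; rw [← pvUnit_iff]; simp [hn]
  · rintro ⟨s, hsl, hs0, hb⟩
    refine ⟨s, hsl, ?_, (bad0_iff l s).mpr hb⟩
    rcases hs0 with h0 | hn
    · exact Or.inl h0
    · right
      rw [← pvUnit_iff] at hn
      simp at hn ⊢
      exact hn

theorem afail_imp_triple (l : List Int) : pvAFailB l = true → pvTripleAnyB l = true := by
  intro h
  rw [afail_iff] at h
  rw [tripleAny_iff]
  obtain ⟨s, _, _, j, hsj, hjl, hall, hval⟩ := h
  exact path_triple l s j hsj hjl hall (by
    rcases hval with hv | hv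
    · left; omega
    · right; omega)

theorem A_eq_not_afail (l : List Int) : isShuffledWell l = ! pvAFailB l := by
  unfold isShuffledWell
  cases hb : pvAFailB l
  · simp only [Bool.not_false]
    cases hg : pvGoA l 0 0
    · exfalso
      have hA := (goA_false_iff l).mp hg
      rw [← afail_iff, hb] at hA
      exact Bool.false_ne_true hA
    · rfl
  · simp only [Bool.not_true]
    exact (goA_false_iff l).mpr ((afail_iff l).mp hb)

theorem B_eq_not_triple (l : List Int) : isShuffledWell_alt l = ! pvTripleAnyB l := by
  unfold isShuffledWell_alt
  cases hb : pvTripleAnyB l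
  · cases hg : pvHasTriple l
    · rfl
    · exfalso
      have := (hasTriple_iff l).mp hg
      rw [← tripleAny_iff, hb] at this
      simp at this
  · have : pvHasTriple l = true := by
      rw [hasTriple_iff, ← tripleAny_iff]; exact hb
    rw [this]

-- ===== VERDICT =====
theorem isShuffledWell_spec : Claim_unchanged_isShuffledWell := by
  intro nums _ hD
  unfold D_isShuffledWell at hD
  rw [A_eq_not_afail, B_eq_not_triple]
  cases hT : pvTripleAnyB nums
  · cases hF : pvAFailB nums
    · rfl
    · exact absurd (afail_imp_triple nums hF) (by simp [hT])
  · cases hF : pvAFailB nums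
    · exact absurd ⟨hT, hF⟩ hD
    · rfl

theorem isShuffledWell_changed : Claim_changed_isShuffledWell := by
  unfold Claim_changed_isShuffledWell
  refine ⟨by decide, by decide, ?_, by decide, by decide⟩
  rw [A_eq_not_afail]
  decide

theorem isShuffledWell_tight : Claim_exact_isShuffledWell := by
  intro nums _ hD
  obtain ⟨hT, hF⟩ := hD
  rw [A_eq_not_afail, B_eq_not_triple, hT, hF]
  decide
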